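-- pv_equiv track=rewrite | github.com/Temyaroslav/MDS2020 | ADS/recursions.py | passwords
-- ===== SOURCE A (Python) =====
-- def voc_to_list(vocabulary):
--     """
--     produces a list lengths such that lengths[i] is the number of
--     words in length i in vocabulary
--     """
--     max_len = max([len(w) for w in vocabulary])
--     lengths = [0] * (max_len + 1)
--     for w in vocabulary:
--         lengths[len(w)] += 1
--     return lengths
--
-- def passwords(L, vocabulary):
--     lengths = voc_to_list(vocabulary)
--     k = len(lengths)
--     tbl = [0] * (L + 1)
--     for i in range(L + 1):
--         if i < k:
--             tbl[i] = lengths[i]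
--         for j in range(min(k, i)):
--             tbl[i] += tbl[i - j - 1] * lengths[j]
--     return tbl[L]
-- ===== SOURCE B (Python) =====
-- def voc_to_list(vocabulary):
--     """
--     produces a list lengths such that lengths[i] is the number of
--     words in length i in vocabulary
--     """
--     max_len = max([len(w) for w in vocabulary])
--     lengths = [0] * (max_len + 1)
--     for w in vocabulary:
--         lengths[len(w)] += 1
--     return lengths
--
-- def passwords(L, vocabulary):
--     # Kitamasa-style: seed the order-k linear recurrence directly, then jump
--     # to index L by square-and-multiply matrix exponentiation of the
--     # companion matrix, instead of filling a length-(L+1) table.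
--     lengths = voc_to_list(vocabulary)
--     k = len(lengths)
--     seeds = []
--     for i in range(k):
--         seeds.append(lengths[i] + sum(seeds[i - j - 1] * lengths[j] for j in range(i)))
--     if L < k:
--         return seeds[L]
--
--     def mat_vec(m, v):
--         return [sum(m[r][j] * v[j] for j in range(k)) for r in range(k)]
--
--     def mat_mul(a, b):
--         return [[sum(a[r][t] * b[t][c] for t in range(k)) for c in range(k)]
--                 for r in range(k)]
--
--     step = [lengths[:]] + [[1 if c == r - 1 else 0 for c in range(k)]
--                            for r in range(1, k)]
--     ident = [[1 if c == r else 0 for c in range(k)] for r in range(k)]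
--
--     def mat_pow(e):
--         if e == 0:
--             return ident
--         h = mat_pow(e // 2)
--         s = mat_mul(h, h)
--         return mat_mul(step, s) if e % 2 else s
--
--     w = mat_vec(mat_pow(L - (k - 1)), seeds[::-1])
--     return w[0]
-- ===== Notes on version B (the rewrite author's own statement) =====
-- stated objective: alternative
-- what changed: A fills a length-(L+1) DP table pulling each entry from its k predecessors; B seeds only the first k values of the order-k linear recurrence and then jumps straight to index L by Kitamasa-style square-and-multiply exponentiation of the k-by-k companion matrix, never materialising the table (asymptotically better in L for small k, but not measurably faster on the sampled inputs, where k grows with the vocabulary).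
import Mathlib
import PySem

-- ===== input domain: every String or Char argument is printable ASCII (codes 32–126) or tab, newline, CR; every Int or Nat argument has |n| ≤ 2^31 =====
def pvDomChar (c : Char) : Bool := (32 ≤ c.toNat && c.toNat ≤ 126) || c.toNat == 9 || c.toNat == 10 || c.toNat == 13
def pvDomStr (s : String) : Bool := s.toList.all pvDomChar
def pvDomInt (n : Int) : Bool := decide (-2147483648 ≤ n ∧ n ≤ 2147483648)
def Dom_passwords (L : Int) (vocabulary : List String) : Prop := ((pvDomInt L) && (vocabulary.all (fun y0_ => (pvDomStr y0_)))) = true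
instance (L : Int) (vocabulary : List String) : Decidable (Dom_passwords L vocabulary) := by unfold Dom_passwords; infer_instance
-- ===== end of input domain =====

-- B replaces A's length-(L+1) dynamic-programming table by Kitamasa-style matrix
-- exponentiation: it seeds the first k values of the order-k linear recurrence, then
-- jumps to index L by square-and-multiply powers of the companion matrix (objective: alternative).

-- ===== PORT A =====
-- helper voc_to_list (shared verbatim by A and B in Python, hence one Lean helper)
def vocToList (vocabulary : List String) : List Int :=
  let maxLen : Int := (PySem.List.max? (vocabulary.map PySem.Str.len) (fun x => x)).getD 0
  let lengths : List Int := List.replicate (maxLen + 1).toNat 0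
  vocabulary.foldl (fun lengths w =>
    PySem.List.pySetD lengths (PySem.Str.len w)
      (PySem.List.pyGetD lengths (PySem.Str.len w) 0 + 1)) lengths

def passwords (L : Int) (vocabulary : List String) : Int :=
  let lengths := vocToList vocabulary
  let k : Int := PySem.List.len lengths
  let tbl : List Int := List.replicate (L + 1).toNat 0
  let tbl := (PySem.List.pyRange 0 (L + 1) 1).foldl (fun tbl i =>
    let tbl := if i < k then PySem.List.pySetD tbl i (PySem.List.pyGetD lengths i 0) else tbl
    (PySem.List.pyRange 0 (min k i) 1).foldl (fun tbl j =>
      PySem.List.pySetD tbl i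
        (PySem.List.pyGetD tbl i 0 + PySem.List.pyGetD tbl (i - j - 1) 0 * PySem.List.pyGetD lengths j 0)) tbl) tbl
  PySem.List.pyGetD tbl L 0

-- ===== PORT B =====
-- B loops over range(k) for Python ints that are provably the Nats 0..k-1, so the
-- port uses List.range / List.range' and in-range List.getD access; exact there.
def pwMatVec (k : Nat) (m : List (List Int)) (v : List Int) : List Int :=
  (List.range k).map (fun r => ((List.range k).map (fun j => (m.getD r []).getD j 0 * v.getD j 0)).sum)

def pwMatMul (k : Nat) (a b : List (List Int)) : List (List Int) :=
  (List.range k).map (fun r => (List.range k).map (fun c =>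
    ((List.range k).map (fun t => (a.getD r []).getD t 0 * (b.getD t []).getD c 0)).sum))

def pwStep (k : Nat) (lengths : List Int) : List (List Int) :=
  lengths :: (List.range' 1 (k - 1)).map (fun r => (List.range k).map (fun c => if c = r - 1 then (1 : Int) else 0))

def pwIdent (k : Nat) : List (List Int) :=
  (List.range k).map (fun r => (List.range k).map (fun c => if c = r then (1 : Int) else 0))

def pwMatPow (k : Nat) (step ident : List (List Int)) (e : Nat) : List (List Int) :=
  if e = 0 then ident
  else
    let h := pwMatPow k step ident (e / 2)
    let s := pwMatMul k h h
    if e % 2 = 1 then pwMatMul k step s else s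
termination_by e
decreasing_by omega

def passwords_alt (L : Int) (vocabulary : List String) : Int :=
  let lengths := vocToList vocabulary
  let k : Nat := lengths.length
  let seeds := (List.range k).foldl (fun seeds i =>
    seeds ++ [lengths.getD i 0 +
      ((List.range i).map (fun j => seeds.getD (i - j - 1) 0 * lengths.getD j 0)).sum]) []
  if L < (k : Int) then PySem.List.pyGetD seeds L 0
  else
    let e : Nat := (L - ((k : Int) - 1)).toNat
    let w := pwMatVec k (pwMatPow k (pwStep k lengths) (pwIdent k) e) seeds.reverse
    w.getD 0 0

-- ===== PRECONDITION & SPEC =====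
-- Pre_ excludes exactly the inputs where Python A raises: L < 0 (IndexError on tbl[L])
-- and an empty vocabulary (ValueError from max([])).
def Pre_passwords (L : Int) (vocabulary : List String) : Prop :=
  0 ≤ L ∧ vocabulary ≠ []
instance (L : Int) (vocabulary : List String) : Decidable (Pre_passwords L vocabulary) := by
  unfold Pre_passwords; infer_instance

def pvWitness_passwords : Int × List String := (3, ["ab", "a"])

def Spec_passwords (L : Int) (vocabulary : List String) (out : Int) : Prop := out = passwords_alt L vocabulary
instance (L : Int) (vocabulary : List String) (out : Int) : Decidable (Spec_passwords L vocabulary out) := by unfold Spec_passwords; infer_instance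

-- ===== CLAIM (what is proved, stated in full; the proofs are below) =====
def Claim_equal_passwords : Prop := ∀ (L : Int) (vocabulary : List String), Dom_passwords L vocabulary → Pre_passwords L vocabulary → Spec_passwords L vocabulary (passwords L vocabulary)

-- ===== LEMMAS AND PROOFS =====

-- the value both programs compute at index i: the common recurrence, by strong recursion
def pwBase (lengths : List Int) (i : Nat) : Int :=
  if i < lengths.length then lengths.getD i 0 else 0

def pwF (lengths : List Int) (i : Nat) : Int :=
  pwBase lengths i +
  ∑ j ∈ (Finset.range (min lengths.length i)).attach,
    pwF lengths (i - j.1 - 1) * lengths.getD j.1 0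
termination_by i
decreasing_by
  have := Finset.mem_range.mp j.2; omega

lemma pwF_def (lengths : List Int) (i : Nat) :
    pwF lengths i = pwBase lengths i +
      ∑ j ∈ Finset.range (min lengths.length i), pwF lengths (i - j - 1) * lengths.getD j 0 := by
  rw [pwF]
  exact congrArg _ (Finset.sum_attach (Finset.range (min lengths.length i)) (fun j => pwF lengths (i - j - 1) * lengths.getD j 0))

lemma getD_set_ne (xs : List Int) (n p : Nat) (v : Int) (h : p ≠ n) :
    (xs.set n v).getD p 0 = xs.getD p 0 := by
  simp [List.getD_eq_getElem?_getD, Ne.symm h]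

lemma getD_set_self (xs : List Int) (n : Nat) (v : Int) (h : n < xs.length) :
    (xs.set n v).getD n 0 = v := by
  simp [List.getD_eq_getElem?_getD, h]

lemma getD_map_range {α : Type} (N p : Nat) (f : Nat → α) (d : α) (h : p < N) :
    (List.map f (List.range N)).getD p d = f p := by
  simp [List.getD_eq_getElem?_getD, h]

-- Nat-level model of A's loops
def innA (lengths : List Int) (i : Nat) (tbl : List Int) (r : Nat) : List Int :=
  (List.range r).foldl
    (fun tbl j => tbl.set i (tbl.getD i 0 + tbl.getD (i - j - 1) 0 * lengths.getD j 0)) tbl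

def stepA (lengths : List Int) (tbl : List Int) (i : Nat) : List Int :=
  innA lengths i (if i < lengths.length then tbl.set i (lengths.getD i 0) else tbl)
    (min lengths.length i)

lemma innA_spec (lengths : List Int) (i : Nat) (tbl : List Int) (r : Nat)
    (hr : r ≤ i) (hi : i < tbl.length)
    (hprev : ∀ q, q < i → tbl.getD q 0 = pwF lengths q) :
    (innA lengths i tbl r).length = tbl.length ∧
    (∀ p, p ≠ i → (innA lengths i tbl r).getD p 0 = tbl.getD p 0) ∧
    (innA lengths i tbl r).getD i 0
      = tbl.getD i 0 + ∑ j ∈ Finset.range r, pwF lengths (i - j - 1) * lengths.getD j 0 := by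
  induction r with
  | zero => simp [innA]
  | succ r ih =>
    obtain ⟨hL, hne, hself⟩ := ih (by omega)
    unfold innA at hL hne hself ⊢
    rw [List.range_succ, List.foldl_append, List.foldl_cons, List.foldl_nil]
    set t := (List.range r).foldl
      (fun tbl j => tbl.set i (tbl.getD i 0 + tbl.getD (i - j - 1) 0 * lengths.getD j 0)) tbl with ht
    have hread : t.getD (i - r - 1) 0 = pwF lengths (i - r - 1) := by
      rw [hne _ (by omega)]; exact hprev _ (by omega)
    refine ⟨by simp [hL], fun p hp => ?_, ?_⟩
    · rw [getD_set_ne _ _ _ _ hp]; exact hne p hp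
    · rw [getD_set_self _ _ _ (by omega), hself, hread, Finset.sum_range_succ]; ring

lemma stepA_spec (lengths : List Int) (tbl : List Int) (i : Nat) (hi : i < tbl.length)
    (hprev : ∀ q, q < i → tbl.getD q 0 = pwF lengths q)
    (hcur : tbl.getD i 0 = 0) :
    (stepA lengths tbl i).length = tbl.length ∧
    (∀ p, p ≠ i → (stepA lengths tbl i).getD p 0 = tbl.getD p 0) ∧
    (stepA lengths tbl i).getD i 0 = pwF lengths i := by
  unfold stepA
  set tbl1 := if i < lengths.length then tbl.set i (lengths.getD i 0) else tbl with h1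
  have h1len : tbl1.length = tbl.length := by rw [h1]; split <;> simp
  have h1ne : ∀ p, p ≠ i → tbl1.getD p 0 = tbl.getD p 0 := by
    intro p hp; rw [h1]; split
    · exact getD_set_ne _ _ _ _ hp
    · rfl
  have h1i : tbl1.getD i 0 = pwBase lengths i := by
    rw [h1]; unfold pwBase; split
    · exact getD_set_self _ _ _ hi
    · exact hcur
  have h1prev : ∀ q, q < i → tbl1.getD q 0 = pwF lengths q := by
    intro q hq; rw [h1ne q (by omega)]; exact hprev q hq
  obtain ⟨l2, ne2, self2⟩ :=
    innA_spec lengths i tbl1 (min lengths.length i) (by omega) (by omega) h1prev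
  refine ⟨l2.trans h1len, fun p hp => (ne2 p hp).trans (h1ne p hp), ?_⟩
  rw [self2, h1i, ← pwF_def]

lemma runA_pref (lengths : List Int) (N m : Nat) (hm : m ≤ N) :
    ((List.range m).foldl (stepA lengths) (List.replicate N 0)).length = N ∧
    ∀ p, p < N → ((List.range m).foldl (stepA lengths) (List.replicate N 0)).getD p 0
        = if p < m then pwF lengths p else 0 := by
  induction m with
  | zero =>
    simp only [List.range_zero, List.foldl_nil]
    refine ⟨List.length_replicate, fun p hp => ?_⟩
    simp [List.getD_eq_getElem?_getD, hp]
  | succ m ih =>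
    obtain ⟨hL, hP⟩ := ih (by omega)
    rw [List.range_succ, List.foldl_append, List.foldl_cons, List.foldl_nil]
    set t := (List.range m).foldl (stepA lengths) (List.replicate N 0) with ht
    have hprev : ∀ q, q < m → t.getD q 0 = pwF lengths q := by
      intro q hq; rw [hP q (by omega), if_pos hq]
    have hcur : t.getD m 0 = 0 := by
      rw [hP m (by omega), if_neg (by omega)]
    obtain ⟨l3, ne3, self3⟩ := stepA_spec lengths t m (by omega) hprev hcur
    refine ⟨l3.trans hL, fun p hp => ?_⟩
    by_cases hpm : p = m
    · subst hpm; rw [self3, if_pos (by omega)]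
    · rw [ne3 p hpm, hP p hp]
      by_cases h2 : p < m
      · rw [if_pos h2, if_pos (by omega)]
      · rw [if_neg h2, if_neg (by omega)]

lemma portA_eq (L : Int) (voc : List String) (h : 0 ≤ L) :
    passwords L voc = pwF (vocToList voc) L.toNat := by
  have hNL : ((L + 1).toNat : Int) = L + 1 := by omega
  unfold passwords
  dsimp only
  rw [show L + 1 = (((L + 1).toNat : Nat) : Int) from hNL.symm]
  rw [PySem.List.pyRange_zero, Int.toNat_natCast, List.foldl_map]
  have hfun : (fun (tbl : List Int) (t : Nat) =>
      (PySem.List.pyRange 0 (min (PySem.List.len (vocToList voc)) (t : Int)) 1).foldl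
        (fun tbl j => PySem.List.pySetD tbl (t : Int)
          (PySem.List.pyGetD tbl (t : Int) 0 +
            PySem.List.pyGetD tbl ((t : Int) - j - 1) 0 * PySem.List.pyGetD (vocToList voc) j 0))
        (if (t : Int) < PySem.List.len (vocToList voc) then
          PySem.List.pySetD tbl (t : Int) (PySem.List.pyGetD (vocToList voc) (t : Int) 0)
        else tbl))
      = stepA (vocToList voc) := by
    funext tbl t
    unfold stepA innA
    rw [show min (PySem.List.len (vocToList voc)) (t : Int)
        = (((min (vocToList voc).length t : Nat) : Int)) by
      simp [PySem.List.len_eq, Nat.cast_min]]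
    rw [PySem.List.pyRange_zero, Int.toNat_natCast, List.foldl_map]
    rw [PySem.List.foldl_congr_mem _ _
      (fun tbl (s : Nat) => tbl.set t (tbl.getD t 0 + tbl.getD (t - s - 1) 0
        * (vocToList voc).getD s 0)) _
      (by
        intro acc s hs
        have hst : s < t := by
          have := List.mem_range.mp hs; omega
        rw [show (t : Int) - (s : Int) - 1 = (((t - s - 1 : Nat) : Int)) by omega]
        simp)]
    congr 1
    simp [PySem.List.len_eq]
  rw [hfun]
  have hfin := (runA_pref (vocToList voc) (L + 1).toNat (L + 1).toNat le_rfl).2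
    L.toNat (by omega)
  rw [PySem.List.pyGetD_of_nonneg _ _ h, hfin, if_pos (by omega)]

-- ===== B-side lemmas =====

lemma sum_map_range_eq (n : Nat) (f : Nat → Int) :
    ((List.range n).map f).sum = ∑ j ∈ Finset.range n, f j := by
  induction n with
  | zero => simp
  | succ n ih => rw [List.range_succ, List.map_append, List.sum_append, Finset.sum_range_succ, ih]; simp

-- the state vector (f(i), f(i-1), …, f(i-k+1))
def pwVec (lengths : List Int) (i : Nat) : List Int :=
  (List.range lengths.length).map (fun r => pwF lengths (i - r))

lemma pwVec_getD (ℓ : List Int) (i j : Nat) (h : j < ℓ.length) :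
    (pwVec ℓ i).getD j 0 = pwF ℓ (i - j) := by
  unfold pwVec; exact getD_map_range _ _ _ _ h

lemma eq_pwVec_of (ℓ : List Int) (i : Nat) (w : List Int) (hlen : w.length = ℓ.length)
    (h : ∀ r, r < ℓ.length → w.getD r 0 = pwF ℓ (i - r)) : w = pwVec ℓ i := by
  apply List.ext_getElem
  · simp [pwVec, hlen]
  · intro r h1 h2
    have hr : r < ℓ.length := by omega
    have := h r hr
    rw [List.getD_eq_getElem _ _ h1] at this
    rw [this]
    simp [pwVec]

lemma matVec_entry (k : Nat) (m : List (List Int)) (v : List Int) (r : Nat) (hr : r < k) :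
    (pwMatVec k m v).getD r 0 = ∑ j ∈ Finset.range k, (m.getD r []).getD j 0 * v.getD j 0 := by
  unfold pwMatVec
  rw [getD_map_range _ _ _ _ hr, sum_map_range_eq]

lemma pwMatVec_length (k : Nat) (m : List (List Int)) (v : List Int) :
    (pwMatVec k m v).length = k := by
  simp [pwMatVec]

lemma matVec_matMul (k : Nat) (a b : List (List Int)) (v : List Int) :
    pwMatVec k (pwMatMul k a b) v = pwMatVec k a (pwMatVec k b v) := by
  unfold pwMatVec
  apply List.map_congr_left
  intro r hr
  have hrk := List.mem_range.mp hr
  rw [sum_map_range_eq, sum_map_range_eq]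
  unfold pwMatMul
  rw [getD_map_range _ _ _ _ hrk]
  calc ∑ j ∈ Finset.range k,
        ((List.range k).map (fun c =>
          ((List.range k).map (fun t => (a.getD r []).getD t 0 * (b.getD t []).getD c 0)).sum)).getD j 0 * v.getD j 0
      = ∑ j ∈ Finset.range k, ∑ t ∈ Finset.range k,
          (a.getD r []).getD t 0 * (b.getD t []).getD j 0 * v.getD j 0 := by
        apply Finset.sum_congr rfl
        intro j hj
        rw [getD_map_range _ _ _ _ (Finset.mem_range.mp hj), sum_map_range_eq, Finset.sum_mul]
    _ = ∑ t ∈ Finset.range k, (a.getD r []).getD t 0 *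
          ((List.range k).map (fun j => (b.getD t []).getD j 0 * v.getD j 0)).sum := by
        rw [Finset.sum_comm]
        apply Finset.sum_congr rfl
        intro t ht
        rw [sum_map_range_eq, Finset.mul_sum]
        apply Finset.sum_congr rfl
        intro j _
        ring
    _ = ∑ t ∈ Finset.range k, (a.getD r []).getD t 0 *
          ((List.range k).map (fun c => ((List.range k).map (fun j => (b.getD c []).getD j 0 * v.getD j 0)).sum)).getD t 0 := by
        apply Finset.sum_congr rfl
        intro t ht
        rw [getD_map_range _ _ _ _ (Finset.mem_range.mp ht)]

lemma indicator_sum (k c : Nat) (hc : c < k) (g : Nat → Int) :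
    ∑ j ∈ Finset.range k, (if j = c then (1 : Int) else 0) * g j = g c := by
  rw [Finset.sum_congr rfl (fun j _ => by rw [ite_mul, one_mul, zero_mul])]
  rw [Finset.sum_ite_eq' (Finset.range k) c g]
  rw [if_pos (Finset.mem_range.mpr hc)]

lemma ident_vec (ℓ : List Int) (i : Nat) :
    pwMatVec ℓ.length (pwIdent ℓ.length) (pwVec ℓ i) = pwVec ℓ i := by
  apply eq_pwVec_of _ _ _ (pwMatVec_length _ _ _)
  intro r hr
  rw [matVec_entry _ _ _ _ hr]
  unfold pwIdent
  rw [Finset.sum_congr rfl (fun j hj => by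
    rw [getD_map_range _ _ _ _ hr, getD_map_range _ _ _ _ (Finset.mem_range.mp hj)])]
  rw [indicator_sum _ _ hr, pwVec_getD _ _ _ hr]

lemma step_vec (ℓ : List Int) (i : Nat) (hi : ℓ.length - 1 ≤ i) :
    pwMatVec ℓ.length (pwStep ℓ.length ℓ) (pwVec ℓ i) = pwVec ℓ (i + 1) := by
  apply eq_pwVec_of _ _ _ (pwMatVec_length _ _ _)
  intro r hr
  rw [matVec_entry _ _ _ _ hr]
  match r with
  | 0 =>
    rw [Finset.sum_congr rfl (fun j hj => by
      unfold pwStep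
      rw [List.getD_cons_zero, pwVec_getD _ _ _ (Finset.mem_range.mp hj)])]
    rw [Nat.sub_zero, pwF_def ℓ (i + 1)]
    have h1 : ¬ (i + 1 < ℓ.length) := by omega
    have h2 : min ℓ.length (i + 1) = ℓ.length := by omega
    unfold pwBase
    rw [if_neg h1, h2, zero_add]
    apply Finset.sum_congr rfl
    intro j hj
    rw [show i + 1 - j - 1 = i - j by omega]
    ring
  | Nat.succ r' =>
    have hrow : (pwStep ℓ.length ℓ).getD (r' + 1) []
        = (List.range ℓ.length).map (fun c => if c = r' + 1 - 1 then (1 : Int) else 0) := by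
      unfold pwStep
      rw [List.getD_cons_succ]
      have hlen : r' < ((List.range' 1 (ℓ.length - 1)).map
          (fun r => (List.range ℓ.length).map (fun c => if c = r - 1 then (1 : Int) else 0))).length := by
        simp; omega
      rw [List.getD_eq_getElem _ _ hlen, List.getElem_map, List.getElem_range']
      norm_num
    rw [Finset.sum_congr rfl (fun j hj => by
      rw [hrow, getD_map_range _ _ _ _ (Finset.mem_range.mp hj)])]
    have hr' : r' + 1 - 1 < ℓ.length := by omega
    rw [indicator_sum _ _ hr' (fun c => (pwVec ℓ i).getD c 0)]
    rw [pwVec_getD _ _ _ hr']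
    congr 1
    omega

lemma pow_vec (ℓ : List Int) (e : Nat) :
    ∀ i, ℓ.length - 1 ≤ i →
      pwMatVec ℓ.length (pwMatPow ℓ.length (pwStep ℓ.length ℓ) (pwIdent ℓ.length) e) (pwVec ℓ i)
        = pwVec ℓ (i + e) := by
  induction e using Nat.strong_induction_on with
  | _ e ih =>
    intro i hi
    rw [pwMatPow]
    by_cases he : e = 0
    · rw [if_pos he, ident_vec, he, Nat.add_zero]
    · rw [if_neg he]
      simp only []
      have hhalf := ih (e / 2) (by omega)
      by_cases hodd : e % 2 = 1
      · rw [if_pos hodd, matVec_matMul, matVec_matMul, hhalf i hi,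
          hhalf (i + e / 2) (by omega), step_vec ℓ _ (by omega)]
        congr 1
        omega
      · rw [if_neg hodd, matVec_matMul, hhalf i hi, hhalf (i + e / 2) (by omega)]
        congr 1
        omega

lemma seeds_eq (ℓ : List Int) (m : Nat) (hm : m ≤ ℓ.length) :
    (List.range m).foldl (fun seeds i =>
        seeds ++ [ℓ.getD i 0 +
          ((List.range i).map (fun j => seeds.getD (i - j - 1) 0 * ℓ.getD j 0)).sum]) []
      = (List.range m).map (pwF ℓ) := by
  induction m with
  | zero => simp
  | succ m ih =>
    rw [List.range_succ]
    rw [List.foldl_append, List.foldl_cons, List.foldl_nil, ih (by omega), List.map_append]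
    congr 1
    simp only [List.map_cons, List.map_nil]
    congr 1
    rw [sum_map_range_eq, pwF_def ℓ m]
    have h1 : min ℓ.length m = m := by omega
    unfold pwBase
    rw [if_pos (by omega), h1]
    congr 1
    apply Finset.sum_congr rfl
    intro j hj
    have hjm := Finset.mem_range.mp hj
    rw [getD_map_range _ _ _ _ (by omega : m - j - 1 < m)]

lemma seeds_reverse (ℓ : List Int) :
    ((List.range ℓ.length).map (pwF ℓ)).reverse = pwVec ℓ (ℓ.length - 1) := by
  unfold pwVec
  apply List.ext_getElem
  · simp
  · intro i h1 h2
    simp only [List.getElem_reverse, List.length_map, List.length_range,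
      List.getElem_map, List.getElem_range] at *

lemma vocToList_len (voc : List String) (h : voc ≠ []) : 1 ≤ (vocToList voc).length := by
  unfold vocToList
  have hfold : ∀ (l : List String) (init : List Int),
      (l.foldl (fun lengths w => PySem.List.pySetD lengths (PySem.Str.len w)
        (PySem.List.pyGetD lengths (PySem.Str.len w) 0 + 1)) init).length = init.length := by
    intro l
    induction l with
    | nil => intro init; simp
    | cons a t ih => intro init; rw [List.foldl_cons, ih]; simp
  cases hmax : PySem.List.max? (voc.map PySem.Str.len) (fun x => x) with
  | none =>
    exact absurd ((PySem.List.max?_eq_none_iff _ _).mp hmax) (by simpa using h)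
  | some m =>
    have hm := PySem.List.max?_mem hmax
    obtain ⟨s, _, hs⟩ := List.mem_map.mp hm
    have h0 : 0 ≤ m := by rw [← hs, PySem.Str.len_eq]; positivity
    simp only [Option.getD_some, hfold, List.length_replicate]
    omega

lemma portB_eq (L : Int) (voc : List String) (h : 0 ≤ L) (hv : voc ≠ []) :
    passwords_alt L voc = pwF (vocToList voc) L.toNat := by
  unfold passwords_alt
  dsimp only
  rw [seeds_eq (vocToList voc) _ le_rfl]
  by_cases hk : L < ((vocToList voc).length : Int)
  · rw [if_pos hk, PySem.List.pyGetD_of_nonneg _ _ h]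
    have hlt : L.toNat < (vocToList voc).length := by omega
    rw [List.getD_eq_getElem _ _ (by simpa using hlt), List.getElem_map, List.getElem_range]
  · rw [if_neg hk, seeds_reverse]
    have hN : 1 ≤ (vocToList voc).length := vocToList_len voc hv
    rw [pow_vec (vocToList voc) _ _ le_rfl]
    unfold pwVec
    rw [getD_map_range _ _ _ _ (by omega : 0 < (vocToList voc).length)]
    congr 1
    omega

-- ===== VERDICT (by name: the statement is the Claim_ definition above) =====
theorem passwords_spec : Claim_equal_passwords := by
  intro L voc _ hpre
  unfold Spec_passwords
  rw [portA_eq L voc hpre.1, portB_eq L voc hpre.1 hpre.2]
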